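-- pv_equiv track=rewrite | github.com/ASintsova/HUTI-RNAseq | analysis/methods/tests/test_keggAPI.py | _write_kegg
-- ===== SOURCE A (Python) =====
-- def _write_kegg(item, info, indent=12):
--
--       s = ""
--       for line in info:
--           partial_lines = line.splitlines()
--           for l in partial_lines:
--               s = s + item.ljust(indent) + l + "\n"
--               if item is not "":  # ensure item is only written on first line
--                   item = ""
--       return s
-- ===== SOURCE B (Python) =====
-- def _write_kegg(item, info, indent=12):
--     lines = [l for line in info for l in line.splitlines()]
--     if not lines:
--         return ""
--     pad = "".ljust(indent)
--     return item.ljust(indent) + "\n".join(lines).replace("\n", "\n" + pad) + "\n"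
-- ===== Notes on version B (the rewrite author's own statement) =====
-- stated objective: faster
-- what changed: Instead of A's per-line state machine that mutates item and re-concatenates the growing string for every line, B joins the flattened lines with newlines once and produces the hanging indent by a single global replace of each newline with newline+pad, with the item prefix and trailing newline attached at the ends.
import Mathlib
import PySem

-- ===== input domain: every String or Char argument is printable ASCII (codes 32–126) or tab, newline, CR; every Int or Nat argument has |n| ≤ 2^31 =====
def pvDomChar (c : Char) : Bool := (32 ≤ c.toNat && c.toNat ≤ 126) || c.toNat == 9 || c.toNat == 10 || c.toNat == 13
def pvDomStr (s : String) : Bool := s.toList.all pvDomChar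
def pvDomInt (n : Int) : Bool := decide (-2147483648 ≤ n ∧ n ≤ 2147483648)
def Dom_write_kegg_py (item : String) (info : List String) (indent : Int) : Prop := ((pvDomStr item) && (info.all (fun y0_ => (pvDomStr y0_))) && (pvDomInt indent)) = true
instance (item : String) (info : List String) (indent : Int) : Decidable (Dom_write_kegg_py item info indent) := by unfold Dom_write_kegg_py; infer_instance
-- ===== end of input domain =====

-- B replaces A's per-line state machine (mutating `item`, concatenating a prefixed
-- piece per line) by one newline-join of the flattened lines plus a single global
-- replace of "\n" with "\n"+pad (objective: alternative). Equivalence on all of Dom.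

-- ===== PORT A =====
-- str.ljust(w): pad on the right with spaces to width w (no pad if w <= len) — exact.
def pyLjust (s : String) (w : Int) : String :=
  s ++ String.ofList (List.replicate (w - (s.length : Int)).toNat ' ')

-- the body of A's inner loop: state = (s, item); `item is not ""` is `item != ""`
-- (CPython interns "", so the identity test coincides with equality on str).
def wkStep (indent : Int) (st : String × String) (l : String) : String × String :=
  (st.1 ++ pyLjust st.2 indent ++ l ++ "\n", if st.2 ≠ "" then "" else st.2)

def write_kegg_py (item : String) (info : List String) (indent : Int) : String :=
  (info.foldl
    (fun st line => (PySem.Str.splitlines line).foldl (wkStep indent) st)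
    ("", item)).1

-- ===== PORT B =====
def write_kegg_py_alt (item : String) (info : List String) (indent : Int) : String :=
  let lines := info.flatMap (fun line => PySem.Str.splitlines line)
  if lines.isEmpty then ""
  else
    let pad := pyLjust "" indent
    pyLjust item indent ++
      PySem.Str.replace (PySem.Str.join "\n" lines) "\n" ("\n" ++ pad) ++ "\n"

-- ===== PRECONDITION & SPEC =====
def Spec_write_kegg_py (item : String) (info : List String) (indent : Int) (out : String) : Prop := out = write_kegg_py_alt item info indent
instance (item : String) (info : List String) (indent : Int) (out : String) : Decidable (Spec_write_kegg_py item info indent out) := by unfold Spec_write_kegg_py; infer_instance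

-- ===== CLAIM (what is proved, stated in full; the proofs are below) =====
def Claim_equal_write_kegg_py : Prop := ∀ (item : String) (info : List String) (indent : Int), Dom_write_kegg_py item info indent → Spec_write_kegg_py item info indent (write_kegg_py item info indent)

-- ===== LEMMAS AND PROOFS =====

-- replace.go with the single-char pattern ['\n'] is a flatMap substitution
theorem repgo (new : List Char) :
    ∀ (l : List Char) (fuel : Nat) (acc : List Char), l.length ≤ fuel →
    PySem.Chars.replace.go ['\n'] new fuel l acc
      = acc.reverse ++ l.flatMap (fun c => if c = '\n' then new else [c]) := by
  intro l
  induction l with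
  | nil => intro fuel acc h; cases fuel <;> simp [PySem.Chars.replace.go]
  | cons c t ih =>
      intro fuel acc h
      cases fuel with
      | zero => simp at h
      | succ f =>
          simp only [List.length_cons, Nat.succ_le_succ_iff] at h
          rw [PySem.Chars.replace.go]
          by_cases hc : c = '\n'
          · subst hc
            rw [if_pos (by simp [List.isPrefixOf])]
            simp only [List.length_singleton, List.drop_succ_cons, List.drop_zero]
            rw [ih f _ h]
            simp
          · rw [if_neg (by simp [List.isPrefixOf]; exact fun h => absurd h.symm hc)]
            rw [ih f _ h]
            simp [hc]

theorem replace_nl (s new : List Char) :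
    PySem.Chars.replace s ['\n'] new
      = s.flatMap (fun c => if c = '\n' then new else [c]) := by
  rw [PySem.Chars.replace]
  rw [if_neg (by simp)]
  simpa using repgo new s s.length [] le_rfl

-- every line produced by splitlines contains no break character
theorem sl_go_no_break (isB : Char → Bool) (s cur : List Char) (acc : List (List Char)) :
    (∀ c ∈ cur, isB c = false) → (∀ l ∈ acc, ∀ c ∈ l, isB c = false) →
    ∀ l ∈ PySem.Chars.splitlines.go isB s cur acc, ∀ c ∈ l, isB c = false := by
  induction s, cur, acc using PySem.Chars.splitlines.go.induct isB with
  | case1 cur acc hemp =>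
      intro hcur hacc
      rw [PySem.Chars.splitlines.go, if_pos hemp]
      simpa using hacc
  | case2 cur acc hemp =>
      intro hcur hacc
      rw [PySem.Chars.splitlines.go, if_neg hemp]
      simp only [List.mem_reverse, List.mem_cons]
      rintro l (rfl | hl)
      · simpa using hcur
      · exact hacc l hl
  | case3 rest cur acc ih =>
      intro hcur hacc
      rw [PySem.Chars.splitlines.go]
      refine ih (by simp) ?_
      intro l hl c hc
      rcases List.mem_cons.mp hl with rfl | hl'
      · exact hcur c (by simpa using hc)
      · exact hacc l hl' c hc
  | case4 c rest cur acc hne hB ih =>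
      intro hcur hacc
      rw [PySem.Chars.splitlines.go, if_pos hB]
      · refine ih (by simp) ?_
        intro l hl c' hc'
        rcases List.mem_cons.mp hl with rfl | hl'
        · exact hcur c' (by simpa using hc')
        · exact hacc l hl' c' hc'
      · exact hne
  | case5 c rest cur acc hne hB ih =>
      intro hcur hacc
      rw [PySem.Chars.splitlines.go, if_neg hB]
      · refine ih ?_ hacc
        intro c' hc'
        rcases List.mem_cons.mp hc' with rfl | hc''
        · exact Bool.eq_false_iff.mpr hB
        · exact hcur c' hc''
      · exact hne

theorem splitlines_no_nl (cs : List Char) :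
    ∀ l ∈ PySem.Chars.splitlines cs, '\n' ∉ l := by
  intro l hl hmem
  rw [PySem.Chars.splitlines] at hl
  have := sl_go_no_break _ cs [] [] (by simp) (by simp) l hl '\n' hmem
  simp at this

theorem flatMap_no_nl (pad : List Char) (l : List Char) (h : '\n' ∉ l) :
    l.flatMap (fun c => if c = '\n' then '\n' :: pad else [c]) = l := by
  induction l with
  | nil => rfl
  | cons c t ih =>
      simp only [List.mem_cons, not_or] at h
      simp [if_neg (Ne.symm h.1), ih h.2]

theorem join_nil_cons (x : List Char) (xs : List (List Char)) :
    PySem.Chars.join [] (x :: xs) = x ++ PySem.Chars.join [] xs := by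
  cases xs <;> simp [PySem.Chars.join, List.intercalate]

-- the heart of the equivalence: substituting '\n' ↦ '\n'::pad in the "\n"-joined
-- newline-free lines, then appending '\n', equals the per-line prefixed layout
theorem core (pad l0 : List Char) (rest : List (List Char))
    (h0 : '\n' ∉ l0) (hr : ∀ l ∈ rest, '\n' ∉ l) :
    (PySem.Chars.join ['\n'] (l0 :: rest)).flatMap
        (fun c => if c = '\n' then '\n' :: pad else [c]) ++ ['\n']
      = l0 ++ '\n' :: PySem.Chars.join [] (rest.map (fun l => pad ++ l ++ ['\n'])) := by
  induction rest generalizing l0 with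
  | nil =>
      simp [PySem.Chars.join, List.intercalate, flatMap_no_nl pad l0 h0]
  | cons l1 t ih =>
      have h1 : '\n' ∉ l1 := hr l1 (by simp)
      have ht : ∀ l ∈ t, '\n' ∉ l := fun l hl => hr l (by simp [hl])
      rw [PySem.Chars.join_cons_cons]
      simp only [List.flatMap_append, flatMap_no_nl pad l0 h0, List.map_cons, join_nil_cons]
      rw [List.append_assoc, List.append_assoc, ih l1 h1 ht]
      simp

-- A's outer double fold is the fold over the flattened lines
theorem foldl_flatMap_splitlines (info : List String)
    (g : String × String → String → String × String) (init : String × String) :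
    info.foldl (fun st line => (PySem.Str.splitlines line).foldl g st) init
      = (info.flatMap (fun line => PySem.Str.splitlines line)).foldl g init := by
  induction info generalizing init with
  | nil => rfl
  | cons a t ih => simp [List.flatMap_cons, List.foldl_append, ih]

theorem join_empty_cons (p : String) (ps : List String) :
    PySem.Str.join "" (p :: ps) = p ++ PySem.Str.join "" ps := by
  cases ps with
  | nil => simp [PySem.Str.join, PySem.Chars.join, List.intercalate]
  | cons q qs => simp [PySem.Str.join, PySem.Chars.join_cons_cons]

-- once the item slot is "", A's fold appends the blank-prefixed lines in order
theorem foldl_step_blank (indent : Int) (L : List String) (s : String) :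
    (L.foldl (wkStep indent) (s, "")).1
      = s ++ PySem.Str.join "" (L.map (fun l => pyLjust "" indent ++ l ++ "\n")) := by
  induction L generalizing s with
  | nil => simp [PySem.Str.join, PySem.Chars.join_nil]
  | cons l t ih =>
      simp only [List.foldl_cons, wkStep, ne_eq, not_true_eq_false,
        join_empty_cons, List.map_cons, ite_self]
      rw [ih]
      simp [String.append_assoc]

-- lines out of String-level splitlines are newline-free
theorem str_splitlines_no_nl (lines : List String) (info : List String)
    (h : lines = info.flatMap (fun line => PySem.Str.splitlines line)) :
    ∀ t ∈ lines, '\n' ∉ t.toList := by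
  subst h
  intro t ht
  simp only [List.mem_flatMap] at ht
  obtain ⟨line, _, hmem⟩ := ht
  have hb : t.toList ∈ PySem.Chars.splitlines line.toList := by
    have := congrArg (fun L => t.toList ∈ L) (PySem.Str.splitlines_map_toList line)
    simp only [eq_iff_iff] at this
    exact this.mp (List.mem_map_of_mem hmem)
  exact splitlines_no_nl line.toList t.toList hb

-- ===== VERDICT (by name: the statement is the Claim_ definition above) =====
theorem write_kegg_py_spec : Claim_equal_write_kegg_py := by
  intro item info indent _
  unfold Spec_write_kegg_py write_kegg_py write_kegg_py_alt
  rw [foldl_flatMap_splitlines]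
  have hnl := str_splitlines_no_nl _ info rfl
  cases h : info.flatMap (fun line => PySem.Str.splitlines line) with
  | nil => rfl
  | cons l0 rest =>
      rw [h] at hnl
      simp only [List.isEmpty_cons, Bool.false_eq_true, if_false, List.foldl_cons, wkStep]
      have h2 : (if item ≠ "" then "" else item) = "" := by
        by_cases hi : item = "" <;> simp [hi]
      rw [h2, foldl_step_blank]
      apply String.toList_inj.mp
      simp only [PySem.Str.replace, PySem.Str.join, String.toList_append,
        String.toList_ofList, List.map_cons, List.map_map]
      have e0 : ("" : String).toList = ([] : List Char) := rfl
      have e2 : ("\n" : String).toList = ['\n'] := rfl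
      rw [e0, e2, replace_nl, List.nil_append]
      have hcore := core (pyLjust "" indent).toList l0.toList (rest.map String.toList)
        (hnl l0 (by simp))
        (by intro l hl
            simp only [List.mem_map] at hl
            obtain ⟨t, ht, rfl⟩ := hl
            exact hnl t (by simp [ht]))
      simp only [List.singleton_append, List.append_assoc]
      rw [hcore]
      simp [List.map_map, Function.comp_def, String.toList_append, List.append_assoc]
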